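-- pv_equiv track=rewrite | github.com/JBTOC/wordle-competitions | app.py | calculate_skins
-- ===== SOURCE A (Python) =====
-- def calculate_skins(round_data, player_names):
--     """
--     Calculate skins for a round.
--     Returns a dictionary with player names as keys and skin counts as values.
--     """
--     skins = {player: 0 for player in player_names}
--     points_pool = 0  # Accumulated points when no one wins
--
--     for hole in round_data['holes']:
--         scores = hole['scores']
--         points_pool += 1  # Each hole adds 1 point to the pool
--
--         # Find the minimum score for this hole
--         min_score = min(scores.values())
--
--         # Find all players with the minimum score
--         winners = [player for player, score in scores.items() if score == min_score]
--
--         # If exactly one player has the lowest score, they win the skin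
--         if len(winners) == 1:
--             winner = winners[0]
--             skins[winner] += points_pool
--             points_pool = 0  # Reset the pool after a skin is won
--
--     return skins
-- ===== SOURCE B (Python) =====
-- def _hole_winner(scores):
--     """Single scan over the hole's scores: running minimum with a tie flag.
--     Returns the sole player with the lowest score, or None on a tie/empty."""
--     items = list(scores.items())
--     if not items:
--         return None
--     best_p, best_s = items[0]
--     tied = False
--     for p, s in items[1:]:
--         if s < best_s:
--             best_p, best_s, tied = p, s, False
--         elif s == best_s:
--             tied = True
--     return None if tied else best_p
--
--
-- def calculate_skins(round_data, player_names):
--     skins = {p: 0 for p in player_names}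
--     winners = [_hole_winner(hole['scores']) for hole in round_data['holes']]
--     pool = 0
--     for w in winners:
--         pool += 1
--         if w is not None:
--             skins[w] += pool
--             pool = 0
--     return skins
-- ===== Notes on version B (the rewrite author's own statement) =====
-- stated objective: alternative
-- what changed: B replaces A's single fused loop (min() over values, then a winners comprehension, then the skins update) by two phases: a one-scan per-hole winner detection keeping a running minimum with a tie flag, materialized as a winners list, and a second fold that distributes the pool over that list.
import Mathlib
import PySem

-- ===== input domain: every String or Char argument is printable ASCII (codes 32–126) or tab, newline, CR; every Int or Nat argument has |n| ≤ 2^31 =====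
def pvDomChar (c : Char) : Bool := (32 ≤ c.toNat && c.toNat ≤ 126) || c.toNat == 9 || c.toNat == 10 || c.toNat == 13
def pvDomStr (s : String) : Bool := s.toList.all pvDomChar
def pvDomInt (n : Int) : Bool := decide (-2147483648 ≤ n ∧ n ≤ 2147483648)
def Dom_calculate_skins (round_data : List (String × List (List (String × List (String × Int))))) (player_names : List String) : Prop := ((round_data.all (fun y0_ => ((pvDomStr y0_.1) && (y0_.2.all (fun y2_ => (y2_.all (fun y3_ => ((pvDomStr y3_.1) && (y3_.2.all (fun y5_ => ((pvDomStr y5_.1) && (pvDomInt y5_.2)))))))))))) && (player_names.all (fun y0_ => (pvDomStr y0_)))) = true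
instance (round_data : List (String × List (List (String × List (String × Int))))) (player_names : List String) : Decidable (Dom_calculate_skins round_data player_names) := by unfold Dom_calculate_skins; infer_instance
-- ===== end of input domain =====

-- B recomputes each hole's sole winner by a single running-min-with-tie-flag scan into a winners list,
-- then distributes the pool over that list in a second fold, instead of A's fused loop with min()+comprehension.


-- ===== PORT A =====
-- the body of A's 'for hole in round_data['holes']' loop, state = (skins, points_pool)
def pvAStep (st : PySem.Dict String Int × Int) (hole : List (String × List (String × Int))) :
    PySem.Dict String Int × Int :=
  let scores : PySem.Dict String Int := PySem.Dict.mk ((PySem.Dict.mk hole).getD "scores" [])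
  let pool := st.2 + 1
  match PySem.List.min? scores.values (fun v => v) with
  | none => (st.1, pool)  -- Python: min([]) raises ValueError; such inputs are outside Pre_
  | some min_score =>
    let winners := (scores.items.filter (fun p => p.2 == min_score)).map Prod.fst
    if winners.length == 1 then
      -- skins[winner] += points_pool  (KeyError when winner missing: outside Pre_)
      (st.1.modify (winners.headD "") 0 (· + pool), 0)
    else (st.1, pool)

def calculate_skins (round_data : List (String × List (List (String × List (String × Int))))) (player_names : List String) : List (String × Int) :=
  let skins : PySem.Dict String Int := player_names.foldl (fun d p => d.insert p 0) PySem.Dict.empty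
  let final := ((PySem.Dict.mk round_data).getD "holes" []).foldl pvAStep (skins, 0)
  final.1.items

-- ===== PORT B =====
-- B's _hole_winner: one scan, running minimum (best_p, best_s) plus a tie flag
def pvHoleWinner (scores : List (String × Int)) : Option String :=
  match (PySem.Dict.mk scores).items with
  | [] => none
  | (p0, s0) :: rest =>
    let r := rest.foldl (fun (acc : String × Int × Bool) q =>
        if q.2 < acc.2.1 then (q.1, q.2, false)
        else if q.2 == acc.2.1 then (acc.1, acc.2.1, true)
        else acc) (p0, s0, false)
    if r.2.2 then none else some r.1

-- the body of B's second loop 'for w in winners', state = (skins, pool)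
def pvBStep (st : PySem.Dict String Int × Int) (w : Option String) : PySem.Dict String Int × Int :=
  let pool := st.2 + 1
  match w with
  | some w => (st.1.modify w 0 (· + pool), 0)
  | none => (st.1, pool)

def calculate_skins_alt (round_data : List (String × List (List (String × List (String × Int))))) (player_names : List String) : List (String × Int) :=
  let skins : PySem.Dict String Int := player_names.foldl (fun d p => d.insert p 0) PySem.Dict.empty
  let winners := ((PySem.Dict.mk round_data).getD "holes" []).map
      (fun hole => pvHoleWinner ((PySem.Dict.mk hole).getD "scores" []))
  let final := winners.foldl pvBStep (skins, 0)
  final.1.items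

-- ===== PRECONDITION & SPEC =====
-- Pre_ excludes exactly the inputs where the Python A raises — a missing 'holes'/'scores' key (KeyError),
-- a hole with empty scores (ValueError from min), a sole winner not in player_names (KeyError) — and
-- association lists with duplicate keys at any dict level, which cannot arise from a Python dict
-- (a Python dict has unique keys, so no Python input A returns on is excluded by the Nodup clauses).
def Pre_calculate_skins (round_data : List (String × List (List (String × List (String × Int))))) (player_names : List String) : Prop :=
  (round_data.map Prod.fst).Nodup ∧
  (PySem.Dict.mk round_data).contains "holes" = true ∧
  ∀ hole ∈ (PySem.Dict.mk round_data).getD "holes" [],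
    (hole.map Prod.fst).Nodup ∧
    (PySem.Dict.mk hole).contains "scores" = true ∧
    (((PySem.Dict.mk hole).getD "scores" []).map Prod.fst).Nodup ∧
    (PySem.Dict.mk hole).getD "scores" [] ≠ [] ∧
    ∀ p ∈ (PySem.Dict.mk hole).getD "scores" [],
      (∀ q ∈ (PySem.Dict.mk hole).getD "scores" [], p.2 ≤ q.2) →
      ((PySem.Dict.mk hole).getD "scores" []).countP (fun q => q.2 == p.2) = 1 →
      p.1 ∈ player_names
instance (round_data : List (String × List (List (String × List (String × Int))))) (player_names : List String) : Decidable (Pre_calculate_skins round_data player_names) := by unfold Pre_calculate_skins; infer_instance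

def pvWitness_calculate_skins : (List (String × List (List (String × List (String × Int))))) × List String :=
  ([("holes", [[("scores", [("a", 1), ("b", 2)])], [("scores", [("a", 3), ("b", 3)])]])], ["a", "b"])

def Spec_calculate_skins (round_data : List (String × List (List (String × List (String × Int))))) (player_names : List String) (out : List (String × Int)) : Prop := out = calculate_skins_alt round_data player_names
instance (round_data : List (String × List (List (String × List (String × Int))))) (player_names : List String) (out : List (String × Int)) : Decidable (Spec_calculate_skins round_data player_names out) := by unfold Spec_calculate_skins; infer_instance

-- ===== CLAIM (what is proved, stated in full; the proofs are below) =====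
def Claim_equal_calculate_skins : Prop := ∀ (round_data : List (String × List (List (String × List (String × Int))))) (player_names : List String), Dom_calculate_skins round_data player_names → Pre_calculate_skins round_data player_names → Spec_calculate_skins round_data player_names (calculate_skins round_data player_names)

-- ===== LEMMAS AND PROOFS =====

-- proof-side abbreviations for B's scan
def pvScanStep (acc : String × Int × Bool) (q : String × Int) : String × Int × Bool :=
  if q.2 < acc.2.1 then (q.1, q.2, false)
  else if q.2 == acc.2.1 then (acc.1, acc.2.1, true)
  else acc

def pvM (l : List (String × Int)) (s0 : Int) : Int := (l.map Prod.snd).foldl min s0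

lemma pvM_le (l : List (String × Int)) (s0 : Int) : pvM l s0 ≤ s0 := by
  induction l generalizing s0 with
  | nil => simp [pvM]
  | cons q tl ih =>
    have h := ih (min s0 q.2)
    simp only [pvM, List.map_cons, List.foldl_cons] at h ⊢
    exact le_trans h (min_le_left _ _)

lemma pvM_attained (l : List (String × Int)) (s0 : Int) :
    pvM l s0 = s0 ∨ ∃ x ∈ l, x.2 = pvM l s0 := by
  induction l generalizing s0 with
  | nil => left; simp [pvM]
  | cons q tl ih =>
    simp only [pvM, List.map_cons, List.foldl_cons] at *
    rcases ih (min s0 q.2) with h | ⟨x, hx, hx2⟩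
    · rcases le_total s0 q.2 with hle | hle
      · left; rw [h]; exact min_eq_left hle
      · right; exact ⟨q, List.mem_cons_self .., by rw [h]; exact (min_eq_right hle).symm⟩
    · right; exact ⟨x, List.mem_cons_of_mem _ hx, hx2⟩

def pvW (l : List (String × Int)) (p0 : String) (s0 : Int) : String :=
  if pvM l s0 = s0 then p0
  else ((l.find? (fun q => q.2 == pvM l s0)).map Prod.fst).getD p0

lemma pvTieCount (c : Nat) : (false || !(c == 0)) = decide (1 < c + 1) := by
  cases c with
  | zero => rfl
  | succ n => simp

def pvT (l : List (String × Int)) (s0 : Int) (t : Bool) : Bool :=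
  if pvM l s0 = s0 then t || !(l.countP (fun q => q.2 == s0) == 0)
  else decide (1 < l.countP (fun q => q.2 == pvM l s0))

lemma pvScan_spec (l : List (String × Int)) : ∀ (p0 : String) (s0 : Int) (t : Bool),
    l.foldl pvScanStep (p0, s0, t) = (pvW l p0 s0, pvM l s0, pvT l s0 t) := by
  induction l with
  | nil => intro p0 s0 t; simp [pvW, pvM, pvT]
  | cons q tl ih =>
    intro p0 s0 t
    have hM : pvM (q :: tl) s0 = pvM tl (min s0 q.2) := by simp [pvM]
    rcases lt_trichotomy q.2 s0 with hlt | heq | hgt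
    · -- q.2 < s0 : state becomes (q.1, q.2, false)
      have hstep : pvScanStep (p0, s0, t) q = (q.1, q.2, false) := by
        simp [pvScanStep, hlt]
      rw [List.foldl_cons, hstep, ih]
      have hmin : min s0 q.2 = q.2 := min_eq_right (le_of_lt hlt)
      have hM' : pvM (q :: tl) s0 = pvM tl q.2 := by rw [hM, hmin]
      have hMle := pvM_le tl q.2
      have hMne : pvM (q :: tl) s0 ≠ s0 := by rw [hM']; omega
      have hW : pvW tl q.1 q.2 = pvW (q :: tl) p0 s0 := by
        rw [pvW, pvW, if_neg hMne, hM']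
        by_cases hq2 : pvM tl q.2 = q.2
        · rw [if_pos hq2, List.find?_cons_of_pos (by simp [hq2])]
          simp
        · rw [if_neg hq2, List.find?_cons_of_neg (by simp; omega)]
          rcases pvM_attained tl q.2 with h | ⟨x, hx, hx2⟩
          · exact absurd h hq2
          · have hs : (tl.find? (fun r => r.2 == pvM tl q.2)).isSome := by
              rw [List.find?_isSome]
              exact ⟨x, hx, by simp [hx2]⟩
            obtain ⟨y, hy⟩ := Option.isSome_iff_exists.mp hs
            rw [hy]; simp
      have hT : pvT tl q.2 false = pvT (q :: tl) s0 t := by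
        rw [pvT, pvT, if_neg hMne, hM']
        by_cases hq2 : pvM tl q.2 = q.2
        · rw [if_pos hq2]
          have hcount : (q :: tl).countP (fun r => r.2 == pvM tl q.2)
              = tl.countP (fun r => r.2 == q.2) + 1 := by
            simp [hq2]
          rw [hcount]
          exact pvTieCount _
        · rw [if_neg hq2]
          have hcount : (q :: tl).countP (fun r => r.2 == pvM tl q.2)
              = tl.countP (fun r => r.2 == pvM tl q.2) := by
            simp [List.countP_cons]
            omega
          rw [hcount]
      rw [hW, hT, hM']
    · -- q.2 = s0 : state becomes (p0, s0, true)
      have hstep : pvScanStep (p0, s0, t) q = (p0, s0, true) := by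
        simp [pvScanStep, heq]
      rw [List.foldl_cons, hstep, ih]
      have hmin : min s0 q.2 = s0 := by omega
      have hM' : pvM (q :: tl) s0 = pvM tl s0 := by rw [hM, hmin]
      have hMle := pvM_le tl s0
      have hW : pvW tl p0 s0 = pvW (q :: tl) p0 s0 := by
        rw [pvW, pvW, hM']
        by_cases hms : pvM tl s0 = s0
        · simp [hms]
        · rw [if_neg hms, if_neg hms, List.find?_cons_of_neg (by simp [heq]; omega)]
      have hT : pvT tl s0 true = pvT (q :: tl) s0 t := by
        rw [pvT, pvT, hM']
        by_cases hms : pvM tl s0 = s0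
        · rw [if_pos hms, if_pos hms]
          have : (q :: tl).countP (fun r => r.2 == s0) = tl.countP (fun r => r.2 == s0) + 1 := by
            simp [heq]
          rw [this]
          cases tl.countP (fun r => r.2 == s0) <;> simp
        · rw [if_neg hms, if_neg hms]
          have : (q :: tl).countP (fun r => r.2 == pvM tl s0) = tl.countP (fun r => r.2 == pvM tl s0) := by
            simp [List.countP_cons, heq]
            omega
          rw [this]
      rw [hW, hT, hM']
    · -- s0 < q.2 : state unchanged
      have hstep : pvScanStep (p0, s0, t) q = (p0, s0, t) := by
        have h1 : ¬ q.2 < s0 := by omega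
        have h2 : (q.2 == s0) = false := by simp; omega
        simp [pvScanStep, h1, h2]
      rw [List.foldl_cons, hstep, ih]
      have hmin : min s0 q.2 = s0 := min_eq_left (le_of_lt hgt)
      have hM' : pvM (q :: tl) s0 = pvM tl s0 := by rw [hM, hmin]
      have hMle := pvM_le tl s0
      have hW : pvW tl p0 s0 = pvW (q :: tl) p0 s0 := by
        rw [pvW, pvW, hM']
        by_cases hms : pvM tl s0 = s0
        · simp [hms]
        · rw [if_neg hms, if_neg hms, List.find?_cons_of_neg (by simp; omega)]
      have hT : pvT tl s0 t = pvT (q :: tl) s0 t := by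
        rw [pvT, pvT, hM']
        by_cases hms : pvM tl s0 = s0
        · rw [if_pos hms, if_pos hms]
          have : (q :: tl).countP (fun r => r.2 == s0) = tl.countP (fun r => r.2 == s0) := by
            simp [List.countP_cons]
            omega
          rw [this]
        · rw [if_neg hms, if_neg hms]
          have : (q :: tl).countP (fun r => r.2 == pvM tl s0) = tl.countP (fun r => r.2 == pvM tl s0) := by
            simp [List.countP_cons]
            omega
          rw [this]
      rw [hW, hT, hM']

-- find? is the head of filter
lemma pvFind_eq_head_filter (l : List (String × Int)) (p : String × Int → Bool) :
    l.find? p = (l.filter p).head? := by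
  induction l with
  | nil => rfl
  | cons a t ih =>
    by_cases h : p a
    · rw [List.find?_cons_of_pos h, List.filter_cons_of_pos h, List.head?_cons]
    · rw [List.find?_cons_of_neg h, List.filter_cons_of_neg h, ih]

-- per-hole: A's loop body equals B's loop body applied to B's precomputed winner
lemma pvStep_eq (st : PySem.Dict String Int × Int) (hole : List (String × List (String × Int))) :
    pvAStep st hole = pvBStep st (pvHoleWinner ((PySem.Dict.mk hole).getD "scores" [])) := by
  rcases h : (PySem.Dict.mk hole).getD "scores" [] with _ | ⟨⟨p0, s0⟩, rest⟩
  · simp [pvAStep, pvHoleWinner, pvBStep, h, PySem.List.min?]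
  · have hmin : PySem.List.min? ((PySem.Dict.mk ((p0, s0) :: rest)).values) (fun v => v)
        = some (pvM rest s0) := by
      rw [PySem.Dict.values_mk]
      exact PySem.List.min?_id_cons s0 (rest.map (fun x => x.2))
    have hscan : rest.foldl pvScanStep (p0, s0, false)
        = (pvW rest p0 s0, pvM rest s0, pvT rest s0 false) := pvScan_spec rest p0 s0 false
    have hBW : pvHoleWinner ((p0, s0) :: rest)
        = (if pvT rest s0 false then none else some (pvW rest p0 s0)) := by
      show (let r := rest.foldl pvScanStep (p0, s0, false);
            if r.2.2 then none else some r.1) = _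
      rw [hscan]
    simp only [pvAStep, pvBStep, h, hmin, hBW]
    have hlen : ((((p0, s0) :: rest).filter (fun p => p.2 == pvM rest s0)).map Prod.fst).length
        = ((p0, s0) :: rest).countP (fun p => p.2 == pvM rest s0) := by
      rw [List.length_map, ← List.countP_eq_length_filter]
    by_cases hcnt : ((p0, s0) :: rest).countP (fun p => p.2 == pvM rest s0) = 1
    · -- exactly one winner: both sides award the pool
      have hw : ((((p0, s0) :: rest).filter (fun p => p.2 == pvM rest s0)).map Prod.fst).headD ""
          = pvW rest p0 s0 ∧ pvT rest s0 false = false := by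
        by_cases hs0 : pvM rest s0 = s0
        · have hhead : ((p0, s0) :: rest).filter (fun p => p.2 == pvM rest s0)
              = (p0, s0) :: rest.filter (fun p => p.2 == pvM rest s0) :=
            List.filter_cons_of_pos (by simp [hs0])
          have hr0 : rest.countP (fun p => p.2 == pvM rest s0) = 0 := by
            rw [List.countP_cons] at hcnt
            simp [hs0] at hcnt
            simpa [hs0] using hcnt
          constructor
          · rw [hhead]; simp [pvW, hs0]
          · rw [pvT, if_pos hs0]
            simpa [hs0] using hr0
        · have hhead : ((p0, s0) :: rest).filter (fun p => p.2 == pvM rest s0)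
              = rest.filter (fun p => p.2 == pvM rest s0) :=
            List.filter_cons_of_neg (by simp; omega)
          have hr1 : rest.countP (fun p => p.2 == pvM rest s0) = 1 := by
            rw [List.countP_cons] at hcnt
            simp [Ne.symm hs0] at hcnt
            omega
          obtain ⟨x, hx⟩ := List.length_eq_one_iff.mp
            (by rw [← List.countP_eq_length_filter]; exact hr1)
          constructor
          · rw [hhead, hx]
            rw [pvW, if_neg hs0, pvFind_eq_head_filter, hx]
            simp
          · rw [pvT, if_neg hs0, hr1]
            simp
        -- close the case
      have hcond : (((((p0, s0) :: rest).filter (fun p => p.2 == pvM rest s0)).map Prod.fst).length == 1) = true := by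
        rw [hlen, hcnt]; rfl
      rw [if_pos hcond, hw.2, if_neg (by simp), hw.1]
    · -- tie (or no sole winner): both sides carry the pool
      have hT : pvT rest s0 false = true := by
        by_cases hs0 : pvM rest s0 = s0
        · have : rest.countP (fun p => p.2 == pvM rest s0) ≠ 0 := by
            rw [List.countP_cons] at hcnt
            simp [hs0] at hcnt ⊢
            omega
          rw [pvT, if_pos hs0]
          simp only [hs0] at this
          simpa using this
        · have hcnt' : ((p0, s0) :: rest).countP (fun p => p.2 == pvM rest s0)
              = rest.countP (fun p => p.2 == pvM rest s0) := by
            rw [List.countP_cons]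
            simp [Ne.symm hs0]
          rcases pvM_attained rest s0 with h' | ⟨x, hx, hx2⟩
          · exact absurd h' hs0
          · have hpos : 0 < rest.countP (fun p => p.2 == pvM rest s0) :=
              List.countP_pos_iff.mpr ⟨x, hx, by simp [hx2]⟩
            rw [pvT, if_neg hs0]
            rw [hcnt'] at hcnt
            simp
            omega
      have hcond : (((((p0, s0) :: rest).filter (fun p => p.2 == pvM rest s0)).map Prod.fst).length == 1) = false := by
        rw [hlen]
        simpa using hcnt
      rw [if_neg (by rw [hcond]; simp), hT, if_pos rfl]

theorem pv_ports_eq (round_data : List (String × List (List (String × List (String × Int))))) (player_names : List String) :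
    calculate_skins round_data player_names = calculate_skins_alt round_data player_names := by
  simp only [calculate_skins, calculate_skins_alt, List.foldl_map]
  have : (fun (st : PySem.Dict String Int × Int) hole =>
      pvBStep st (pvHoleWinner ((PySem.Dict.mk hole).getD "scores" []))) = pvAStep := by
    funext st hole; exact (pvStep_eq st hole).symm
  rw [this]

-- ===== VERDICT (by name: the statement is the Claim_ definition above) =====
theorem calculate_skins_spec : Claim_equal_calculate_skins := by
  intro rd names _ _
  unfold Spec_calculate_skins
  exact pv_ports_eq rd names
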